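/- GENERATED by mk_final_copies.py from the proof of the farm's unit `start_decoder.C13a` (farm:start_decoder.C13a.1: Proof.lean) as the
   re-elaboration sweep compiled it — do not edit. -/
import Asan.CheckWalk
import Vorbis.Spec.StartDecoderATest
import Vorbis.Spec.StartDecoderCarry
import Vorbis.Spec.Units.start_decoder_C13a
import Vorbis.Spec.Worked.start_decoder_C13a_Lemmas

open X86 X86.User Asan Vorbis Vorbis.Spec Vorbis.Spec.StartDecoder

set_option maxRecDepth 100000
set_option maxHeartbeats 4000000

namespace Vorbis.Spec.start_decoder_C13a

/-- `&sorted_values[j]` as the code computes it (`movsxd rbp, r12d ; shl rbp, 2 ; add rbp, [r14+838H]`): `sv + 4 j`. -/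
theorem c13a_elem (j sv : Nat) (hj : j < 2 ^ 31) (hsv : sv + 4 * j < 2 ^ 64) :
    (UInt64.ofNat j <<< 2 + UInt64.ofNat sv).toNat = sv + 4 * j := by
  have e3 : (2 : UInt64).toNat % 64 = 2 := by decide
  rw [UInt64.toNat_add, UInt64.toNat_shiftLeft, UInt64.toNat_ofNat', UInt64.toNat_ofNat', e3, Nat.shiftLeft_eq]
  omega

/-- The spilled `sparse` read back (`mov DWORD PTR [rsp+4CH], r13d` at 0x11509c, `r13 = addr x`, `x < 2^32`): `d[R+4CH] = x`. -/
theorem c13a_spill (m : Mem) (a : Word) (R x : Nat) (ha : a = addr R) (hx : x < 2 ^ 32) :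
    (m.writeLE (a + 76) 4 (Word.part Width.w32 (addr x)).toNat).u32 (R + 0x4c) = x := by
  have ea : addr (R + 0x4c) = a + 76 := by
    rw [ha]
    simp only [vfield]
  have ex : (Word.part Width.w32 (addr x)).toNat = x := by
    unfold addr
    exact cnt32_part_toNat x hx
  unfold Mem.u32
  rw [ea, Mem.readLE_writeLE_same _ _ _ _ (by decide), ex]
  exact Nat.mod_eq_of_lt (by omega)

/-- The stored `lookup_type` read back (`mov BYTE PTR [r14+19H], 2` at 0x1150af). -/
theorem c13a_type2 (m : Mem) (c : Nat) :
    Codebook.lookup_type (m.writeLE (addr c + 25) 1 2) c = 2 := by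
  have ea : addr (c + 25) = addr c + 25 := by
    simp only [vfield]
  simp only [vacc, voff]
  unfold Mem.u8
  rw [ea, Mem.readLE_writeLE_same _ _ _ _ (by decide)]

/-- Segment C13a (the head of the outer loop 3910, 0x115057): `cmp r12d, [rsp+44H] ; jge` (both in [0, 2^24): a natural compare).
`j ≥ len`: the checked store `c->lookup_type = 2` (0x1150aa / 0x1150af), `jmp 0x114dfa`: `AtC15` through `c13a_exit15`.
`j < len`: `z = sparse ? c->sorted_values[j] : j` into `d[R+48H]` (checks 0x115070 `c + 838H`, 0x115086 `sorted_values + 4j` inside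
K4's block: `c13a_site_sv`), `r15d = d[R+24H] = 0` (Z24), `ebx = 1`, `d[R+4CH] = sparse`, `jmp 0x114f32`: `At13K … 0 loop12` through
`c13a_enter`. The only memory changes are the pushed return addresses of the check calls, the two dword locals and the one byte
of the struct. -/
theorem c13a_walk : Vorbis.Spec.start_decoder_C13a.Statement := by
  intro Lay hLay μ hμ u₀ hcode h_load4 h_load8 h_store1
  intro g i n d j v hat
  obtain ⟨A, mults, A2, A3, Ai, Am, h, hn, hd⟩ := hat
  have hfr := h.frame
  have he := hfr.entry
  v_entry he
  have w_rip := hfr.rip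
  have w_eq : Mem.EqOn Vorbis.L.textLo Vorbis.L.textHi u₀.mem v.mem := hfr.code
  have hdf : v.flags .df = false := (show abiInv _ from hfr.inv).1
  have hmx : v.mxcsr &&& 0x1F80 = 0x1F80 := (show abiInv _ from hfr.inv).2
  have hsse := Vorbis.sseOK_of_abiInv hfr.inv
  have hRA : g.RA = (g.e.reg .rsp).toNat := rfl
  have hpos : Pos g A := Pos.of hfr h.cur
  have hm0 : MInv g i A2 A3 Ai A v.mem := MInv.of hfr h.cur
  have hcw := hm0.c_where
  have p1 := hpos.r_eq
  have p2 := hpos.ra_lo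
  have p3 := hpos.ra_hi
  have hsp : (v.reg .rsp).toNat = g.R := by
    rw [hfr.rsp]
    exact toNat_addr _ (by omega)
  have c_r14 := h.cur.r14
  have c_r12 := h.r12
  have c_r13 := h.r13
  -- the numbers: `N(c)` in [0, 2^24), `j ≤ N`, `sparse` ∈ {0, 1}
  have hN0 := Codebook.N_nonneg h.k.k1 h.k.k2
  have hNlt := Codebook.N_lt h.k.k1 h.k.k2
  have hjle := h.j_le
  have hsp01 := h.k.k2.sparse_01
  obtain ⟨nn, hnn⟩ : ∃ nn : Nat, Codebook.N v.mem (g.cb v.mem i) = (nn : Int) :=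
    ⟨(Codebook.N v.mem (g.cb v.mem i)).toNat, (Int.toNat_of_nonneg hN0).symm⟩
  have hj31 : j < 2 ^ 31 := by omega
  -- the loads of the stretch: `len` (d[R+44H]), Z24 (d[R+24H]), `c->sorted_values`
  have hLen : v.mem.readLE (v.reg .rsp + 68) 4 = nn := by
    have hu : v.mem.readLE (v.reg .rsp + 68) 4 = v.mem.u32 (g.R + 0x44) := by
      rw [hfr.rsp]
      simp only [vfield]
    have h1 := h.slot_len
    rw [hnn] at h1
    unfold Mem.i32 at h1
    have hc := sint32_cases (v.mem.u32 (g.R + 0x44))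
    have hlt : v.mem.u32 (g.R + 0x44) < 256 ^ 4 := Mem.readLE_lt' v.mem _ 4
    rw [hu]
    clear hcw p1 p2 p3 hsp hN0 hNlt hjle hj31
    omega
  have hZ24 : v.mem.readLE (v.reg .rsp + 36) 4 = 0 := by
    have := h.cur.sd.frame.z24 (by omega) (by omega)
    rw [hfr.rsp]
    simp only [vfield]
    exact this
  have hSV : v.mem.readLE (addr (g.cb v.mem i) + 2104) 8 = Codebook.sorted_values v.mem (g.cb v.mem i) := by
    simp only [vacc, voff, Mem.ptr, Mem.u64, addr_add_lit]
  have hsx : Word.ofBV (BitVec.signExtend 64 (Word.part Width.w32 (addr j))) = UInt64.ofNat j := by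
    unfold addr
    exact cnt32_sext j hj31
  -- the check sites inside the struct
  have hsite25 := c13a_site h.cur 25 1 (by decide) (by decide)
  have hsite2104 := c13a_site h.cur 2104 8 (by decide) (by decide)
  have hwh25 := Vorbis.Spec.site_where hfr.shadow hfr.offText (by omega) hsite25
  have e : L.textHi = 0x119d40 := rfl
  have ecb : (addr (g.cb v.mem i)).toNat = g.cb v.mem i := toNat_addr _ (by omega)
  -- the branch conditions as arithmetic
  have cN := cnt32_toInt nn (by omega)
  have cJ : (Word.part Width.w32 (addr j)).toInt = (j : Int) := by
    unfold addr
    exact cnt32_part_toInt j hj31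
  have cS : (Word.part Width.w32 (addr (Codebook.sparse v.mem (g.cb v.mem i)))).toNat =
      Codebook.sparse v.mem (g.cb v.mem i) := by
    unfold addr
    exact cnt32_part_toNat _ (by omega)
  u_walk hcode [hμ.vendor, hsx] until [Vorbis.L.start_decoder.cut166, Vorbis.L.start_decoder.loop12] span [Vorbis.L.textLo, Vorbis.L.textHi] side (first | v_side | (simp only [addr]; v_side))
  case check_1150aa =>
    -- 0x1150aa: the store check of `c->lookup_type`
    have hun : ShadowUntouched v.mem s_1150aa.mem := by v_untouched
    exact Vorbis.Spec.check_site hfr.shadow hun hsite25 (by u_omega)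
  case side_code =>
    -- the store of 0x1150af misses the text
    have e25 : (addr (g.cb v.mem i) + 25).toNat = g.cb v.mem i + 25 := by u_omega
    have k := hwh25.1
    rw [e] at k
    right
    rw [e25]
    exact k
  case check_115070 =>
    -- 0x115070: the load check of `c->sorted_values`
    have hun : ShadowUntouched v.mem s_115070.mem := by v_untouched
    exact Vorbis.Spec.check_site hfr.shadow hun hsite2104 (by u_omega)
  case check_115086 =>
    -- 0x115086: the load check of `c->sorted_values[j]`, `j < N = sorted_entries` (a sparse book)
    have hun : ShadowUntouched v.mem s_115086.mem := by v_untouched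
    rw [cN, cJ] at hbr_11505e
    rw [cS] at hbr_115063
    have hsite := c13a_site_sv h hbr_115063 (by omega)
    have hwh := Vorbis.Spec.site_where hfr.shadow hfr.offText (by omega) hsite
    exact Vorbis.Spec.check_site hfr.shadow hun hsite (c13a_elem j _ hj31 (by omega))
  · -- 0x114dfa (`j ≥ len`): `c->lookup_type = 2` stored, `AtC15`
    have hun : ShadowUntouched v.mem s_1150b4.mem := by v_untouched
    have hinv : (conv u₀).inv s_1150b4 := by v_inv
    have hs : Mem.SameExcept [⟨g.R - 8, g.R⟩, ⟨g.cb v.mem i + 25, g.cb v.mem i + 26⟩] v.mem s_1150b4.mem := by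
      u_same
    have ht : Codebook.lookup_type s_1150b4.mem (g.cb v.mem i) = 2 := by
      rw [w_mem]
      exact c13a_type2 _ _
    have hq : ∀ x, x ∈ [(⟨g.R - 8, g.R⟩ : Span), ⟨g.cb v.mem i + 25, g.cb v.mem i + 26⟩] →
        c13a_WinT g (g.cb v.mem i) x := by
      intro x hx
      simp only [List.mem_cons, List.not_mem_nil, or_false] at hx
      unfold c13a_WinT
      rcases hx with rfl | rfl
      · simp only []
        omega
      · simp only []
        omega
    have hout := c13a_exit15 h hs hun hq w_rip w_rsp w_eq hinv (w_kept.get .r14 rfl) ht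
    exact ReachVia.done (Or.inl ⟨A, mults, A2, A3, Ai, hout⟩)
  · -- 0x114f32 (`j < len`, a dense book): `z` and `sparse` spilled, `k = 0`, `div = 1`: the inner head
    have hun : ShadowUntouched v.mem s_1150a1.mem := by v_untouched
    have hinv : (conv u₀).inv s_1150a1 := by v_inv
    have hs : Mem.SameExcept [(⟨g.R + 72, g.R + 80⟩ : Span)] v.mem s_1150a1.mem := by
      u_same
    have hslot : s_1150a1.mem.u32 (g.R + 0x4c) = Codebook.sparse v.mem (g.cb v.mem i) := by
      rw [w_mem]
      exact c13a_spill _ _ _ _ hfr.rsp (by omega)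
    have hq : ∀ x, x ∈ [(⟨g.R + 72, g.R + 80⟩ : Span)] → c13a_Win g x := by
      intro x hx
      simp only [List.mem_cons, List.not_mem_nil, or_false] at hx
      unfold c13a_Win
      rcases hx with rfl
      · simp only []
        omega
    rw [cN, cJ] at hbr_11505e
    have hK := c13a_enter h hn hd hs hun hq w_rip (w_kept.get .rsp rfl) w_eq hinv (w_kept.get .r14 rfl)
      ((w_kept.get .r12 rfl).trans c_r12) (by omega) w_r15 w_rbx hslot
    exact ReachVia.done (Or.inr ⟨A, mults, A2, A3, Ai, Am, hK⟩)
  · -- 0x114f32 (`j < len`, a sparse book): `z` and `sparse` spilled, `k = 0`, `div = 1`: the inner head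
    have hun : ShadowUntouched v.mem s_1150a1.mem := by v_untouched
    have hinv : (conv u₀).inv s_1150a1 := by v_inv
    have hs : Mem.SameExcept [(⟨g.R - 8, g.R⟩ : Span), ⟨g.R + 72, g.R + 80⟩] v.mem s_1150a1.mem := by
      u_same
    have hslot : s_1150a1.mem.u32 (g.R + 0x4c) = Codebook.sparse v.mem (g.cb v.mem i) := by
      rw [w_mem]
      exact c13a_spill _ _ _ _ hfr.rsp (by omega)
    have hq : ∀ x, x ∈ [(⟨g.R - 8, g.R⟩ : Span), ⟨g.R + 72, g.R + 80⟩] → c13a_Win g x := by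
      intro x hx
      simp only [List.mem_cons, List.not_mem_nil, or_false] at hx
      unfold c13a_Win
      rcases hx with rfl | rfl
      · simp only []
        omega
      · simp only []
        omega
    rw [cN, cJ] at hbr_11505e
    have hK := c13a_enter h hn hd hs hun hq w_rip w_rsp w_eq hinv (w_kept.get .r14 rfl)
      ((w_kept.get .r12 rfl).trans c_r12) (by omega) w_r15 w_rbx hslot
    exact ReachVia.done (Or.inr ⟨A, mults, A2, A3, Ai, Am, hK⟩)

end Vorbis.Spec.start_decoder_C13a

theorem Vorbis.Spec.Worked.start_decoder_C13a_ok : Vorbis.Spec.start_decoder_C13a.Statement := Vorbis.Spec.start_decoder_C13a.c13a_walk
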